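-- pv_equiv track=rewrite | github.com/gFedonin/MTB | ml_methods/simple_feature_selection.py | transpose_snp_matrix
-- ===== SOURCE A (Python) =====
-- def transpose_snp_matrix(sample_to_snps, pheno):
--     snp_to_samples = {}
--     snp_to_resistant_count = {}
--     for sample_id, snp_list in sample_to_snps.items():
--         if pheno[sample_id] == 1:
--             is_resistant = True
--         else:
--             is_resistant = False
--         for snp in snp_list:
--             sample_list = snp_to_samples.get(snp)
--             if sample_list is None:
--                 snp_to_samples[snp] = [sample_id]
--                 if is_resistant:
--                     snp_to_resistant_count[snp] = 1
--                 else: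
--                     snp_to_resistant_count[snp] = 0
--             else:
--                 sample_list.append(sample_id)
--                 if is_resistant:
--                     snp_to_resistant_count[snp] += 1
--
--     return snp_to_samples, snp_to_resistant_count
-- ===== SOURCE B (Python) =====
-- def transpose_snp_matrix(sample_to_snps, pheno):
--     snp_to_samples = {}
--     for sample_id, snp_list in sample_to_snps.items():
--         for snp in snp_list:
--             snp_to_samples.setdefault(snp, []).append(sample_id)
--     snp_to_resistant_count = {
--         snp: sum(1 for s in samples if pheno[s] == 1)
--         for snp, samples in snp_to_samples.items()
--     }
--     return snp_to_samples, snp_to_resistant_count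
-- ===== Notes on version B (the rewrite author's own statement) =====
-- stated objective: simpler
-- what changed: B builds the transposed snp->samples map alone in the first pass (setdefault+append, no fused count bookkeeping) and then derives snp_to_resistant_count in a separate dict comprehension over the built lists, instead of A's interleaved three-way branch maintaining both dicts at once.
import Mathlib
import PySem

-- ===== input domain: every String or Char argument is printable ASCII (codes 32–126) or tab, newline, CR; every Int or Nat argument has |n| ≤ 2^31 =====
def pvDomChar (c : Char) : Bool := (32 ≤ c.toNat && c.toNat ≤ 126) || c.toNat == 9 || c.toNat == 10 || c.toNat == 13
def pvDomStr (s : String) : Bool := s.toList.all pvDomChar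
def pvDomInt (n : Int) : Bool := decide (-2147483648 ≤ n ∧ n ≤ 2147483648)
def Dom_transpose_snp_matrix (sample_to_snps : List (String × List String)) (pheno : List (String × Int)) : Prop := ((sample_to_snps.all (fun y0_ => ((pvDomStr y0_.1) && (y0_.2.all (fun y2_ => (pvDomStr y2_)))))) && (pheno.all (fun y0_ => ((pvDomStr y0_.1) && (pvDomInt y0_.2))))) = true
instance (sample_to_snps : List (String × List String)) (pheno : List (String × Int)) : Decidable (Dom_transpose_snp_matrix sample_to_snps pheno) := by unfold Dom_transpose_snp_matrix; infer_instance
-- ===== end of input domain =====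

-- B splits A's fused single pass: it first builds the transposed snp->samples map alone,
-- then derives the resistant counts in a separate pass over the built map (objective: simpler).


-- ===== PORT A =====
-- A's single fused pass: per sample, per snp, branch on whether the snp is new,
-- maintaining snp_to_samples and snp_to_resistant_count together.
-- pheno[sample_id] is rendered as getD _ 0; Pre_ guarantees the key is present.
def transpose_snp_matrix (sample_to_snps : List (String × List String)) (pheno : List (String × Int)) : (List (String × List String)) × (List (String × Int)) :=
  let phenoD : PySem.Dict String Int := PySem.Dict.mk pheno
  let st := sample_to_snps.foldl
    (fun (st : PySem.Dict String (List String) × PySem.Dict String Int) p =>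
      let is_resistant : Bool := phenoD.getD p.1 0 == 1
      p.2.foldl
        (fun st snp =>
          match st.1.get? snp with
          | none => (st.1.insert snp [p.1],
                     st.2.insert snp (if is_resistant then 1 else 0))
          | some lst => (st.1.insert snp (lst ++ [p.1]),
                     if is_resistant then st.2.insert snp (st.2.getD snp 0 + 1) else st.2))
        st)
    (PySem.Dict.empty, PySem.Dict.empty)
  (st.1.items, st.2.items)

-- ===== PORT B =====
-- B: first loop builds only snp_to_samples via setdefault-append (= Dict.modify with default []),
-- then a dict comprehension over its items computes each count.
def transpose_snp_matrix_alt (sample_to_snps : List (String × List String)) (pheno : List (String × Int)) : (List (String × List String)) × (List (String × Int)) :=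
  let phenoD : PySem.Dict String Int := PySem.Dict.mk pheno
  let d := sample_to_snps.foldl
    (fun d p => p.2.foldl (fun d snp => d.modify snp [] (· ++ [p.1])) d)
    (PySem.Dict.empty : PySem.Dict String (List String))
  let c : PySem.Dict String Int :=
    PySem.Dict.mk (d.items.map (fun q => (q.1, (q.2.countP (fun s => phenoD.getD s 0 == 1) : Int))))
  (d.items, c.items)

-- ===== PRECONDITION & SPEC =====
-- Pre_ excludes exactly the inputs where Python A raises KeyError: a sample_id of
-- sample_to_snps that has no entry in pheno.
def Pre_transpose_snp_matrix (sample_to_snps : List (String × List String)) (pheno : List (String × Int)) : Prop :=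
  ∀ p ∈ sample_to_snps, (PySem.Dict.mk pheno).contains p.1 = true
instance (sample_to_snps : List (String × List String)) (pheno : List (String × Int)) : Decidable (Pre_transpose_snp_matrix sample_to_snps pheno) := by unfold Pre_transpose_snp_matrix; infer_instance
def pvWitness_transpose_snp_matrix : (List (String × List String)) × (List (String × Int)) :=
  ([("s1", ["x", "y"]), ("s2", ["y"])], [("s1", 1), ("s2", 0)])

def Spec_transpose_snp_matrix (sample_to_snps : List (String × List String)) (pheno : List (String × Int)) (out : (List (String × List String)) × (List (String × Int))) : Prop := out = transpose_snp_matrix_alt sample_to_snps pheno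
instance (sample_to_snps : List (String × List String)) (pheno : List (String × Int)) (out : (List (String × List String)) × (List (String × Int))) : Decidable (Spec_transpose_snp_matrix sample_to_snps pheno out) := by unfold Spec_transpose_snp_matrix; infer_instance

-- ===== CLAIM (what is proved, stated in full; the proofs are below) =====
def Claim_equal_transpose_snp_matrix : Prop := ∀ (sample_to_snps : List (String × List String)) (pheno : List (String × Int)), Dom_transpose_snp_matrix sample_to_snps pheno → Pre_transpose_snp_matrix sample_to_snps pheno → Spec_transpose_snp_matrix sample_to_snps pheno (transpose_snp_matrix sample_to_snps pheno)

-- ===== LEMMAS AND PROOFS =====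

-- the derived-counts dict B computes from a samples dict, for an abstract resistance predicate
def pvMkC (r : String → Bool) (d : PySem.Dict String (List String)) : PySem.Dict String Int :=
  PySem.Dict.mk (d.items.map (fun q => (q.1, (q.2.countP r : Int))))

theorem pvMkC_keys (r : String → Bool) (d : PySem.Dict String (List String)) :
    (pvMkC r d).keys = d.keys := by
  simp [pvMkC, PySem.Dict.keys]

theorem pvMkC_contains (r : String → Bool) (d : PySem.Dict String (List String)) (k : String) :
    (pvMkC r d).contains k = d.contains k := by
  simp [PySem.Dict.contains_eq_decide_mem_keys, pvMkC_keys]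

-- one inner step of A, started from an invariant state, equals the pvMkC image of B's step
theorem pv_inner_step (r : String → Bool) (sid snp : String)
    (d : PySem.Dict String (List String)) (hnd : d.keys.Nodup) :
    (match d.get? snp with
      | none => (d.insert snp [sid], (pvMkC r d).insert snp (if r sid then 1 else 0))
      | some lst => (d.insert snp (lst ++ [sid]),
          if r sid then (pvMkC r d).insert snp ((pvMkC r d).getD snp 0 + 1) else pvMkC r d))
    = (d.modify snp [] (· ++ [sid]), pvMkC r (d.modify snp [] (· ++ [sid]))) := by
  cases h : d.get? snp with
  | none =>
    dsimp only
    have hc : d.contains snp = false := by rw [PySem.Dict.contains_eq_isSome_get?, h]; rfl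
    have hc' : (pvMkC r d).contains snp = false := by rw [pvMkC_contains]; exact hc
    have hmod : d.modify snp [] (· ++ [sid]) = d.insert snp [sid] := by
      simp [PySem.Dict.modify, PySem.Dict.getD, h]
    rw [hmod]
    refine Prod.ext rfl ?_
    apply PySem.Dict.ext
    rw [PySem.Dict.items_insert_of_not_contains _ _ hc']
    simp [pvMkC, PySem.Dict.items_insert_of_not_contains _ _ hc, List.countP_cons, apply_ite]
  | some lst =>
    dsimp only
    have hc : d.contains snp = true := by rw [PySem.Dict.contains_eq_isSome_get?, h]; rfl
    have hc' : (pvMkC r d).contains snp = true := by rw [pvMkC_contains]; exact hc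
    have hmod : d.modify snp [] (· ++ [sid]) = d.insert snp (lst ++ [sid]) := by
      simp [PySem.Dict.modify, PySem.Dict.getD, h]
    have hndC : (pvMkC r d).keys.Nodup := by rw [pvMkC_keys]; exact hnd
    have hmC : (snp, (lst.countP r : Int)) ∈ (pvMkC r d).items := by
      exact List.mem_map.2 ⟨(snp, lst), PySem.Dict.mem_items_of_get?_eq_some d h, rfl⟩
    have hgetD : (pvMkC r d).getD snp 0 = (lst.countP r : Int) :=
      PySem.Dict.getD_of_mem_items _ hmC hndC 0
    have hval : ∀ p ∈ d.items, p.1 = snp → p.2 = lst := by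
      intro p hp hk
      have := PySem.Dict.get?_of_mem_items d (k := p.1) (v := p.2) (by simpa using hp) hnd
      rw [hk, h] at this
      exact (Option.some.injEq _ _ ▸ this).symm
    rw [hmod]
    refine Prod.ext rfl ?_
    cases hr : r sid with
    | true =>
      rw [if_pos rfl]
      dsimp only
      rw [hgetD]
      apply PySem.Dict.ext
      rw [PySem.Dict.items_insert_of_contains _ _ hc']
      simp only [pvMkC, PySem.Dict.items_insert_of_contains _ _ hc, List.map_map]
      apply List.map_congr_left
      intro p hp
      by_cases hk : p.1 = snp
      · simp [Function.comp, hk, List.countP_append, hr]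
      · simp [Function.comp, hk]
    | false =>
      rw [if_neg (by simp)]
      dsimp only
      apply PySem.Dict.ext
      simp only [pvMkC, PySem.Dict.items_insert_of_contains _ _ hc, List.map_map]
      apply List.map_congr_left
      intro p hp
      by_cases hk : p.1 = snp
      · have hp2 : p.2 = lst := hval p hp hk
        simp [Function.comp, hk, hp2, List.countP_append, hr]
      · simp [Function.comp, hk]

theorem pv_modify_nodup (d : PySem.Dict String (List String)) (snp : String)
    (f : List String → List String) (hnd : d.keys.Nodup) :
    (d.modify snp [] f).keys.Nodup := by
  rw [PySem.Dict.keys_modify]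
  exact (PySem.Dict.nodup_keys_insert _ _ _ hnd)

-- the inner loop (one sample's snp list) preserves the invariant
theorem pv_inner_fold (r : String → Bool) (sid : String) (snps : List String)
    (d : PySem.Dict String (List String)) (hnd : d.keys.Nodup) :
    snps.foldl
      (fun st snp =>
        match st.1.get? snp with
        | none => (st.1.insert snp [sid], st.2.insert snp (if r sid then 1 else 0))
        | some lst => (st.1.insert snp (lst ++ [sid]),
            if r sid then st.2.insert snp (st.2.getD snp 0 + 1) else st.2))
      (d, pvMkC r d)
    = (snps.foldl (fun d snp => d.modify snp [] (· ++ [sid])) d,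
       pvMkC r (snps.foldl (fun d snp => d.modify snp [] (· ++ [sid])) d)) := by
  induction snps generalizing d with
  | nil => rfl
  | cons snp snps ih =>
    simp only [List.foldl_cons]
    rw [pv_inner_step r sid snp d hnd]
    exact ih _ (pv_modify_nodup d snp _ hnd)

theorem pv_inner_fold_nodup (sid : String) (snps : List String)
    (d : PySem.Dict String (List String)) (hnd : d.keys.Nodup) :
    (snps.foldl (fun d snp => d.modify snp [] (· ++ [sid])) d).keys.Nodup := by
  induction snps generalizing d with
  | nil => exact hnd
  | cons snp snps ih => exact ih _ (pv_modify_nodup d snp _ hnd)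

-- the outer loop preserves the invariant
theorem pv_outer_fold (r : String → Bool) (l : List (String × List String))
    (d : PySem.Dict String (List String)) (hnd : d.keys.Nodup) :
    l.foldl
      (fun (st : PySem.Dict String (List String) × PySem.Dict String Int) p =>
        p.2.foldl
          (fun st snp =>
            match st.1.get? snp with
            | none => (st.1.insert snp [p.1], st.2.insert snp (if r p.1 then 1 else 0))
            | some lst => (st.1.insert snp (lst ++ [p.1]),
                if r p.1 then st.2.insert snp (st.2.getD snp 0 + 1) else st.2))
          st)
      (d, pvMkC r d)
    = (l.foldl (fun d p => p.2.foldl (fun d snp => d.modify snp [] (· ++ [p.1])) d) d,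
       pvMkC r (l.foldl (fun d p => p.2.foldl (fun d snp => d.modify snp [] (· ++ [p.1])) d) d)) := by
  induction l generalizing d with
  | nil => rfl
  | cons p l ih =>
    simp only [List.foldl_cons]
    rw [pv_inner_fold r p.1 p.2 d hnd]
    exact ih _ (pv_inner_fold_nodup p.1 p.2 d hnd)

theorem pvMkC_empty (r : String → Bool) : pvMkC r PySem.Dict.empty = PySem.Dict.empty := rfl

-- ===== VERDICT (by name: the statement is the Claim_ definition above) =====
theorem transpose_snp_matrix_spec : Claim_equal_transpose_snp_matrix := by
  intro s2s pheno _ _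
  unfold Spec_transpose_snp_matrix transpose_snp_matrix transpose_snp_matrix_alt
  have h := pv_outer_fold (fun s => (PySem.Dict.mk pheno).getD s 0 == 1) s2s
    PySem.Dict.empty PySem.Dict.nodup_keys_empty
  rw [pvMkC_empty] at h
  simp only []
  rw [h]
  rfl
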